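-- pv_equiv track=rewrite | github.com/SHATAJV/jeux_gratte_ciel | gratte_ciel.py | check_limitation
-- ===== SOURCE A (Python) =====
-- def height_visibility(building_height):
--     maximum = 0
--     nb_visible = 0
--     for height in building_height:
--         if height > maximum:
--             maximum = height
--             nb_visible += 1
--     return nb_visible
--
-- def check_limitation(answermatrix, limit):
--     size = len(answermatrix)
--     for i in range(size):
--         if 0 < limit['left'][i] != height_visibility(answermatrix[i]):
--             return False
--
--         if 0 < limit['right'][i] != height_visibility(answermatrix[i][::-1]):
--             return False
--
--         col = [answermatrix[j][i] for j in range(size)]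
--         if 0 < limit['top'][i] != height_visibility(col):
--             return False
--
--         if 0 < limit['bottom'][i] != height_visibility(col[::-1]):
--             return False
--
--     return True
-- ===== SOURCE B (Python) =====
-- def check_limitation(answermatrix, limit):
--     size = len(answermatrix)
--
--     def visible(line):
--         return sum(h > max([0] + line[:i]) for i, h in enumerate(line))
--
--     cols = [list(c) for c in zip(*answermatrix)]
--
--     def vis(side, i):
--         if side == 'left':
--             return visible(answermatrix[i])
--         if side == 'right':
--             return visible(answermatrix[i][::-1])
--         if side == 'top':
--             return visible(cols[i])
--         return visible(cols[i][::-1])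
--
--     return all(not (0 < limit[side][i] != vis(side, i))
--                for i in range(size)
--                for side in ('left', 'right', 'top', 'bottom'))
-- ===== Notes on version B (the rewrite author's own statement) =====
-- stated objective: alternative
-- what changed: B replaces A's explicit loop with four early-return ifs, a per-index column comprehension and a running-maximum counter by a single short-circuiting all(...) over a generator: the matrix is transposed once with zip(*answermatrix), and visibility is recomputed per position as 'height exceeds the maximum of 0 and its prefix' instead of A's running-max loop.
import Mathlib
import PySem

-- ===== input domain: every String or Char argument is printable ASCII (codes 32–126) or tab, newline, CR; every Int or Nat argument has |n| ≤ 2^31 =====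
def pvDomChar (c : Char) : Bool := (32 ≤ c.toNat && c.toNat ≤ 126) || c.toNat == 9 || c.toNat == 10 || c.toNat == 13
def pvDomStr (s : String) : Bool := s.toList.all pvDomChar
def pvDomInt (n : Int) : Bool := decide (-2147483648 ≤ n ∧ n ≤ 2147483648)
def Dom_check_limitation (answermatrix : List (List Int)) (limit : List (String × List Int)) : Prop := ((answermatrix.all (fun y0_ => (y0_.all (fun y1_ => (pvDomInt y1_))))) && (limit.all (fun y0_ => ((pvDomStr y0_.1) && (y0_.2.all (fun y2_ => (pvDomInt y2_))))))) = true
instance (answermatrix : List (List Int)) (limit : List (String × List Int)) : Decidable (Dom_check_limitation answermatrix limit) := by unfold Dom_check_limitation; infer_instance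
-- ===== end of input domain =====

-- B validates the same skyscraper limits with one short-circuiting all(...) over a generator, a
-- zip-transpose built once, and a per-position prefix-maximum visibility test, instead of A's
-- explicit loop with four early returns, a per-index column comprehension and a running-max counter.

-- ===== PORT A =====
-- dict lookup limit[k] (first match; none = KeyError)
def pvLookup (limit : List (String × List Int)) (k : String) : Option (List Int) :=
  (limit.find? (fun p => p.1 == k)).map (·.2)

def height_visibility (building_height : List Int) : Int :=
  (building_height.foldl
    (fun (st : Int × Int) height => if st.1 < height then (height, st.2 + 1) else st)
    ((0 : Int), (0 : Int))).2

-- `0 < limit[k][i] != v` as one check; none (KeyError/IndexError = Python raise) ↦ false, excluded by Pre_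
def pvChkA (limit : List (String × List Int)) (k : String) (i : Int) (v : Int) : Bool :=
  match (pvLookup limit k).bind (fun l => PySem.List.pyGet? l i) with
  | some L => !(decide (0 < L) && decide (L ≠ v))
  | none => false

-- col = [answermatrix[j][i] for j in range(size)]; none = IndexError, excluded by Pre_
def pvColA (am : List (List Int)) (i : Int) : List Int → Option (List Int)
  | [] => some []
  | j :: js =>
    match (PySem.List.pyGet? am j).bind (fun row => PySem.List.pyGet? row i), pvColA am i js with
    | some v, some l => some (v :: l)
    | _, _ => none

-- body of A's loop for one i (false = `return False`, or a raise — raises are excluded by Pre_);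
-- row[::-1] / col[::-1] is List.reverse (PySem.List.slice?_none_none_neg_one)
def pvStepA (am : List (List Int)) (limit : List (String × List Int)) (size i : Int) : Bool :=
  match PySem.List.pyGet? am i with
  | none => false
  | some row =>
    pvChkA limit "left" i (height_visibility row) &&
    (pvChkA limit "right" i (height_visibility row.reverse) &&
     (match pvColA am i (PySem.List.pyRange 0 size 1) with
      | none => false
      | some col =>
        pvChkA limit "top" i (height_visibility col) &&
        pvChkA limit "bottom" i (height_visibility col.reverse)))

-- `for i in range(size): … return False … ; return True` as .all over the range
def check_limitation (answermatrix : List (List Int)) (limit : List (String × List Int)) : Bool :=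
  (PySem.List.pyRange 0 (answermatrix.length : Int) 1).all
    (fun i => pvStepA answermatrix limit (answermatrix.length : Int) i)

-- ===== PORT B =====
-- sum(h > max([0] + line[:i]) for i, h in enumerate(line))
def pvVisible (line : List Int) : Int :=
  ((PySem.List.enumerate line).map (fun iv =>
    if (PySem.List.max? ((0 : Int) :: PySem.List.slice line none (some iv.1)) (fun x => x)).getD 0 < iv.2
    then (1 : Int) else 0)).sum

-- [list(c) for c in zip(*m)]  (columns up to the shortest row; exact for zip of lists)
def pvZipStar (m : List (List Int)) : List (List Int) :=
  match m with
  | [] => []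
  | r :: rs =>
    (List.range (rs.foldl (fun acc row => min acc row.length) r.length)).map
      (fun k => m.map (fun row => row.getD k 0))

def pvSides : List String := ["left", "right", "top", "bottom"]

-- vis(side, i); none = IndexError on cols[i] / answermatrix[i] (a Python raise, outside Pre_)
def pvVisB (am cols : List (List Int)) (s : String) (i : Int) : Option Int :=
  if s = "left" then (PySem.List.pyGet? am i).map pvVisible
  else if s = "right" then (PySem.List.pyGet? am i).map (fun r => pvVisible r.reverse)
  else if s = "top" then (PySem.List.pyGet? cols i).map pvVisible
  else (PySem.List.pyGet? cols i).map (fun c => pvVisible c.reverse)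

-- not (0 < limit[side][i] != vis(side, i)), evaluated lazily as in the Python generator;
-- none (KeyError/IndexError = Python raise) ↦ false, outside Pre_
def pvChkB (limit : List (String × List Int)) (am cols : List (List Int)) (s : String) (i : Int) : Bool :=
  match (pvLookup limit s).bind (fun l => PySem.List.pyGet? l i) with
  | none => false
  | some L =>
    if decide (0 < L) then
      match pvVisB am cols s i with
      | none => false
      | some v => decide (L = v)
    else true

-- all(... for i in range(size) for side in (...)) as nested .all
def check_limitation_alt (answermatrix : List (List Int)) (limit : List (String × List Int)) : Bool :=
  let cols := pvZipStar answermatrix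
  (PySem.List.pyRange 0 (answermatrix.length : Int) 1).all
    (fun i => pvSides.all (fun s => pvChkB limit answermatrix cols s i))

-- ===== PRECONDITION & SPEC =====
-- Pre_-side helpers (independent of the ports): visibility as 'count of positive strict records',
-- and the access/check bookkeeping of A's scan order.
def pvVis3 (line : List Int) : Int :=
  ((List.range line.length).countP (fun j =>
    decide (0 < line.getD j 0) && (line.take j).all (fun y => decide (y < line.getD j 0))) : Int)

def pvSideIdx (s : String) : Nat :=
  if s = "left" then 0 else if s = "right" then 1 else if s = "top" then 2 else 3

def pvSideVal (am : List (List Int)) (s : String) (i : Nat) : Int :=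
  if s = "left" then pvVis3 (am.getD i [])
  else if s = "right" then pvVis3 (am.getD i []).reverse
  else if s = "top" then pvVis3 (am.map (fun r => r.getD i 0))
  else pvVis3 (am.map (fun r => r.getD i 0)).reverse

-- the lookup limit[s][i] made by check number 4*i+pvSideIdx s exists
def pvOk (limit : List (String × List Int)) (s : String) (i : Nat) : Bool :=
  (pvLookup limit s).isSome && decide (i < ((pvLookup limit s).getD []).length)

-- the column for index i can be built (no row runs out)
def pvColOk (am : List (List Int)) (i : Nat) : Bool :=
  am.all (fun row => decide (i < row.length))

-- check (i, s) is evaluated without raising and fails (makes A return False)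
def pvFail (am : List (List Int)) (limit : List (String × List Int)) (s : String) (i : Nat) : Bool :=
  pvOk limit s i && (decide (pvSideIdx s < 2) || pvColOk am i) &&
    decide (0 < ((pvLookup limit s).getD []).getD i 0) &&
    decide (((pvLookup limit s).getD []).getD i 0 ≠ pvSideVal am s i)

-- Pre_ excludes EXACTLY the inputs on which A raises (KeyError/IndexError from a missing limit
-- entry, a too-short limit list, or a too-short row, reached before any failing check).
-- Pre_ holds iff A returns: either every access A's scan makes exists
-- (first disjunct: all rows long enough and every limit[s][i] present), or some check fails
-- strictly before A's first raising access (raise points numbered in A's interleaved order: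
-- limit access (i,s) at 16i+4*pvSideIdx s, the column construction at 16i+6).
def Pre_check_limitation (answermatrix : List (List Int)) (limit : List (String × List Int)) : Prop :=
  ((∀ row ∈ answermatrix, answermatrix.length ≤ row.length) ∧
   (∀ s ∈ pvSides, ∀ i ∈ List.range answermatrix.length, pvOk limit s i = true)) ∨
  (∃ i ∈ List.range answermatrix.length, ∃ s ∈ pvSides,
     pvFail answermatrix limit s i = true ∧
     (∀ i' ∈ List.range answermatrix.length, ∀ s' ∈ pvSides, pvOk limit s' i' = false →
        16 * i + 4 * pvSideIdx s < 16 * i' + 4 * pvSideIdx s') ∧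
     (∀ i' ∈ List.range answermatrix.length, pvColOk answermatrix i' = false →
        16 * i + 4 * pvSideIdx s < 16 * i' + 6))
instance (answermatrix : List (List Int)) (limit : List (String × List Int)) : Decidable (Pre_check_limitation answermatrix limit) := by unfold Pre_check_limitation; infer_instance

def pvWitness_check_limitation : List (List Int) × (List (String × List Int)) :=
  ([[1, 2], [2, 1]], [("left", [2, 1]), ("right", [1, 2]), ("top", [2, 1]), ("bottom", [1, 2])])

def Spec_check_limitation (answermatrix : List (List Int)) (limit : List (String × List Int)) (out : Bool) : Prop := out = check_limitation_alt answermatrix limit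
instance (answermatrix : List (List Int)) (limit : List (String × List Int)) (out : Bool) : Decidable (Spec_check_limitation answermatrix limit out) := by unfold Spec_check_limitation; infer_instance

-- ===== CLAIM (what is proved, stated in full; the proofs are below) =====
def Claim_equal_check_limitation : Prop := ∀ (answermatrix : List (List Int)) (limit : List (String × List Int)), Dom_check_limitation answermatrix limit → Pre_check_limitation answermatrix limit → Spec_check_limitation answermatrix limit (check_limitation answermatrix limit)

-- ===== LEMMAS AND PROOFS =====

-- visibility as a simple recursion (A's running-max loop)
def visSpec (m : Int) : List Int → Int
  | [] => 0
  | h :: t => if m < h then 1 + visSpec h t else visSpec m t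

theorem hv_foldl (l : List Int) : ∀ (m c : Int),
    (l.foldl (fun (st : Int × Int) h => if st.1 < h then (h, st.2 + 1) else st) (m, c)).2
      = c + visSpec m l := by
  induction l with
  | nil => intro m c; simp [visSpec]
  | cons h t ih =>
    intro m c
    by_cases hmh : m < h
    · simp [visSpec, hmh, List.foldl_cons, ih]; omega
    · simp [visSpec, hmh, List.foldl_cons, ih]

theorem hv_eq_visSpec (l : List Int) : height_visibility l = visSpec 0 l := by
  simpa [height_visibility] using hv_foldl l 0 0

-- per-position visibility count (B's test against the prefix maximum)
def countB (m : Int) : List Int → Int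
  | [] => 0
  | h :: t => (if m < h then 1 else 0) + countB (max m h) t

theorem countB_eq_visSpec (l : List Int) : ∀ m, countB m l = visSpec m l := by
  induction l with
  | nil => intro m; simp [countB, visSpec]
  | cons h t ih =>
    intro m
    by_cases hmh : m < h
    · have hm : max m h = h := by omega
      simp [countB, visSpec, hmh, hm, ih]
    · have hm : max m h = m := by omega
      simp [countB, visSpec, hmh, hm, ih]

theorem pvVisible_aux (t : List Int) : ∀ (p : List Int),
    ((PySem.List.enumerate t (p.length : Int)).map (fun iv =>
      if (PySem.List.max? ((0 : Int) :: PySem.List.slice (p ++ t) none (some iv.1)) (fun x => x)).getD 0 < iv.2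
      then (1 : Int) else 0)).sum
    = countB (p.foldl max 0) t := by
  induction t with
  | nil => intro p; simp [PySem.List.enumerate, countB]
  | cons h t ih =>
    intro p
    rw [PySem.List.enumerate_cons, List.map_cons, List.sum_cons]
    have h1 : PySem.List.slice (p ++ h :: t) none (some (p.length : Int)) = p := by
      rw [PySem.List.slice_to_natCast]
      exact List.take_left ..
    have h2 : PySem.List.max? ((0 : Int) :: p) (fun x => x) = some (p.foldl max 0) :=
      PySem.List.max?_id_cons 0 p
    have h3 : ((p.length : Int) + 1) = ((p ++ [h]).length : Int) := by simp
    have h4 : p ++ h :: t = (p ++ [h]) ++ t := by simp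
    rw [countB]
    rw [h1, h2]
    simp only [Option.getD_some, h3, h4]
    rw [ih (p ++ [h])]
    simp [List.foldl_append]

theorem pvVisible_eq_hv (l : List Int) : pvVisible l = height_visibility l := by
  have h := pvVisible_aux l []
  simp only [List.nil_append, List.length_nil, Nat.cast_zero, List.foldl_nil] at h
  have h2 : pvVisible l = countB 0 l := h
  rw [h2, countB_eq_visSpec, ← hv_eq_visSpec]

theorem all_ext {α : Type} (l : List α) (p q : α → Bool) (h : ∀ x ∈ l, p x = q x) :
    l.all p = l.all q := by
  induction l with
  | nil => rfl
  | cons x t ih =>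
    simp only [List.all_cons, h x (List.mem_cons_self),
      ih (fun y hy => h y (List.mem_cons_of_mem x hy))]

theorem map_range_getD {β : Type} (g : List Int → β) (am : List (List Int)) :
    (List.range am.length).map (fun j => g (am.getD j [])) = am.map g := by
  apply List.ext_getElem
  · simp
  · intro i h1 h2
    simp at h1
    simp [List.getD_eq_getElem, h1]

theorem colA_ok (am : List (List Int)) (k : Nat) (hcol : ∀ row ∈ am, k < row.length) :
    ∀ js : List Int, (∀ j ∈ js, 0 ≤ j ∧ j < (am.length : Int)) →
      pvColA am (k : Int) js = some (js.map (fun j => (am.getD j.toNat []).getD k 0)) := by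
  intro js
  induction js with
  | nil => intro _; rfl
  | cons j t ih =>
    intro hj
    obtain ⟨hj0, hjlt⟩ := hj j (List.mem_cons_self)
    have hjn : j.toNat < am.length := by omega
    have h1 : PySem.List.pyGet? am j = some (am.getD j.toNat []) := by
      rw [PySem.List.pyGet?_of_nonneg am hj0]
      simp [List.getElem?_eq_getElem hjn, List.getD_eq_getElem]
    have hrowmem : am.getD j.toNat [] ∈ am := by
      rw [List.getD_eq_getElem _ _ hjn]
      exact List.getElem_mem hjn
    have hklt : k < (am.getD j.toNat []).length := hcol _ hrowmem
    have h2 : PySem.List.pyGet? (am.getD j.toNat []) (k : Int)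
        = some ((am.getD j.toNat []).getD k 0) := by
      rw [PySem.List.pyGet?_natCast, List.getElem?_eq_getElem hklt,
        List.getD_eq_getElem _ _ hklt]
    simp only [pvColA, h1, Option.bind_some, h2,
      ih (fun x hx => hj x (List.mem_cons_of_mem j hx)), List.map_cons]

theorem colA_range (am : List (List Int)) (k : Nat)
    (hcol : ∀ row ∈ am, k < row.length) :
    pvColA am (k : Int) (PySem.List.pyRange 0 (am.length : Int) 1)
      = some (am.map (fun r => r.getD k 0)) := by
  rw [colA_ok am k hcol
      _ (fun j hj => by
        rw [PySem.List.mem_pyRange_one] at hj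
        exact ⟨hj.1, hj.2⟩)]
  congr 1
  rw [PySem.List.pyRange_one]
  simp only [sub_zero, Int.toNat_natCast, List.map_map]
  rw [← map_range_getD (fun r => r.getD k 0) am]
  apply List.ext_getElem
  · simp
  · intro i h1 h2
    simp

theorem foldl_min_ge (n : Nat) : ∀ (rs : List (List Int)) (a : Nat), n ≤ a →
    (∀ r ∈ rs, n ≤ r.length) → n ≤ rs.foldl (fun acc row => min acc row.length) a := by
  intro rs
  induction rs with
  | nil => intro a ha _; exact ha
  | cons r t ih =>
    intro a ha hr
    exact ih (min a r.length)
      (le_min ha (hr r (List.mem_cons_self)))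
      (fun x hx => hr x (List.mem_cons_of_mem r hx))

theorem rowget_some (am : List (List Int)) (i : Nat) (hi : i < am.length) :
    PySem.List.pyGet? am (i : Int) = some (am.getD i []) := by
  rw [PySem.List.pyGet?_natCast, List.getElem?_eq_getElem hi, List.getD_eq_getElem _ _ hi]

theorem stepA_eq (am : List (List Int)) (limit : List (String × List Int)) (k : Nat)
    (hk : k < am.length) (hcol : ∀ row ∈ am, k < row.length) :
    pvStepA am limit (am.length : Int) (k : Int) =
      (pvChkA limit "left" (k : Int) (height_visibility (am.getD k [])) &&
       (pvChkA limit "right" (k : Int) (height_visibility (am.getD k []).reverse) &&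
        (pvChkA limit "top" (k : Int) (height_visibility (am.map (fun r => r.getD k 0))) &&
         pvChkA limit "bottom" (k : Int)
           (height_visibility (am.map (fun r => r.getD k 0)).reverse)))) := by
  rw [pvStepA, rowget_some am k hk, colA_range am k hcol]

-- cols[i] of the zip-transpose, when every row is long enough
theorem zipstar_get (am : List (List Int)) (i : Nat) (hi : i < am.length)
    (hcol : ∀ row ∈ am, i < row.length) :
    PySem.List.pyGet? (pvZipStar am) (i : Int)
      = some (am.map (fun row => row.getD i 0)) := by
  cases am with
  | nil => simp at hi
  | cons r rs =>
    have hmin : i + 1 ≤ rs.foldl (fun acc row => min acc row.length) r.length :=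
      foldl_min_ge (i + 1) rs r.length (hcol r (List.mem_cons_self))
        (fun x hx => hcol x (List.mem_cons_of_mem r hx))
    have hlen : i < (pvZipStar (r :: rs)).length := by
      simp only [pvZipStar, List.length_map, List.length_range]
      omega
    rw [PySem.List.pyGet?_natCast, List.getElem?_eq_getElem hlen]
    simp only [pvZipStar, List.getElem_map, List.getElem_range]

theorem visB_left (am cols : List (List Int)) (i : Nat) (hi : i < am.length) :
    pvVisB am cols "left" (i : Int) = some (height_visibility (am.getD i [])) := by
  simp [pvVisB, rowget_some am i hi, pvVisible_eq_hv]

theorem visB_right (am cols : List (List Int)) (i : Nat) (hi : i < am.length) :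
    pvVisB am cols "right" (i : Int) = some (height_visibility (am.getD i []).reverse) := by
  simp [pvVisB, rowget_some am i hi, pvVisible_eq_hv]

theorem visB_top (am : List (List Int)) (i : Nat) (hi : i < am.length)
    (hcol : ∀ row ∈ am, i < row.length) :
    pvVisB am (pvZipStar am) "top" (i : Int)
      = some (height_visibility (am.map (fun r => r.getD i 0))) := by
  simp [pvVisB, zipstar_get am i hi hcol, pvVisible_eq_hv]

theorem visB_bottom (am : List (List Int)) (i : Nat) (hi : i < am.length)
    (hcol : ∀ row ∈ am, i < row.length) :
    pvVisB am (pvZipStar am) "bottom" (i : Int)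
      = some (height_visibility (am.map (fun r => r.getD i 0)).reverse) := by
  simp [pvVisB, zipstar_get am i hi hcol, pvVisible_eq_hv]

-- B's lazily-guarded check equals A's check when the visibility it guards is defined
theorem chkB_eq_chkA (limit : List (String × List Int)) (am cols : List (List Int))
    (s : String) (i : Int) (v : Int) (hvis : pvVisB am cols s i = some v) :
    pvChkB limit am cols s i = pvChkA limit s i v := by
  rw [pvChkB, pvChkA]
  cases (pvLookup limit s).bind (fun l => PySem.List.pyGet? l i) with
  | none => rfl
  | some L =>
    rw [hvis]
    by_cases h0 : 0 < L
    · by_cases hv : L = v <;> simp [h0, hv]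
    · simp [h0]

theorem vis3_aux : ∀ (t : List Int) (m : Int),
    (((List.range t.length).countP (fun j =>
        decide (m < t.getD j 0) && (t.take j).all (fun y => decide (y < t.getD j 0)))) : Int)
      = countB m t := by
  intro t
  induction t with
  | nil => intro m; simp [countB]
  | cons h t ih =>
    intro m
    rw [countB, List.length_cons, List.range_succ_eq_map, List.countP_cons, List.countP_map]
    have hpt : ∀ j ∈ List.range t.length,
        ((fun j => decide (m < (h :: t).getD j 0) &&
          ((h :: t).take j).all (fun y => decide (y < (h :: t).getD j 0))) ∘ Nat.succ) j
        = (fun j => decide (max m h < t.getD j 0) &&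
            (t.take j).all (fun y => decide (y < t.getD j 0))) j := by
      intro j _
      simp only [Function.comp, List.getD_cons_succ, List.take_succ_cons, List.all_cons]
      by_cases h1 : m < t.getD j 0 <;> by_cases h2 : h < t.getD j 0 <;>
        simp [Bool.and_assoc, h1, h2,
          (by omega : (max m h < t.getD j 0) ↔ (m < t.getD j 0 ∧ h < t.getD j 0))]
    rw [List.countP_congr (fun j hj => by rw [hpt j hj])]
    simp only [List.getD_cons_zero, List.take_zero, List.all_nil, Bool.and_true, decide_eq_true_eq]
    push_cast
    rw [ih (max m h)]
    by_cases hm : m < h <;> simp [hm] <;> omega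

theorem sideVal_left (am : List (List Int)) (i : Nat) :
    pvSideVal am "left" i = pvVis3 (am.getD i []) := by simp [pvSideVal]
theorem sideVal_right (am : List (List Int)) (i : Nat) :
    pvSideVal am "right" i = pvVis3 (am.getD i []).reverse := by simp [pvSideVal]
theorem sideVal_top (am : List (List Int)) (i : Nat) :
    pvSideVal am "top" i = pvVis3 (am.map (fun r => r.getD i 0)) := by simp [pvSideVal]
theorem sideVal_bottom (am : List (List Int)) (i : Nat) :
    pvSideVal am "bottom" i = pvVis3 (am.map (fun r => r.getD i 0)).reverse := by simp [pvSideVal]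

theorem pvVis3_eq_hv (l : List Int) : pvVis3 l = height_visibility l := by
  rw [pvVis3, vis3_aux l 0, countB_eq_visSpec, ← hv_eq_visSpec]

theorem all_false {α : Type} (l : List α) (p : α → Bool) (x : α) (hx : x ∈ l)
    (hpx : p x = false) : l.all p = false := by
  induction l with
  | nil => cases hx
  | cons a t ih =>
    rcases List.mem_cons.mp hx with rfl | hmem
    · simp [List.all_cons, hpx]
    · simp [List.all_cons, ih hmem]

theorem chk_false (limit : List (String × List Int)) (s : String) (i : Nat) (v : Int)
    (hok : pvOk limit s i = true)
    (h0 : 0 < ((pvLookup limit s).getD []).getD i 0)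
    (hne : ((pvLookup limit s).getD []).getD i 0 ≠ v) :
    pvChkA limit s (i : Int) v = false := by
  simp only [pvOk, Bool.and_eq_true, decide_eq_true_eq] at hok
  obtain ⟨hsome, hlen⟩ := hok
  obtain ⟨lL, hlL⟩ := Option.isSome_iff_exists.mp hsome
  rw [hlL] at h0 hne hlen
  simp only [Option.getD_some] at h0 hne hlen
  have hget : PySem.List.pyGet? lL (i : Int) = some (lL.getD i 0) := by
    rw [PySem.List.pyGet?_natCast, List.getElem?_eq_getElem hlen, List.getD_eq_getElem _ _ hlen]
  simp only [pvChkA, hlL, Option.bind_some, hget]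
  simp only [decide_eq_true h0, decide_eq_true hne, Bool.and_self, Bool.not_true]

theorem aport_false (am : List (List Int)) (limit : List (String × List Int)) (i : Nat)
    (hi : i < am.length)
    (hs : pvStepA am limit (am.length : Int) (i : Int) = false) :
    check_limitation am limit = false := by
  rw [check_limitation]
  exact all_false _ _ ((i : Nat) : Int)
    (PySem.List.mem_pyRange_one.mpr ⟨by omega, by omega⟩) hs

theorem step_false_left (am : List (List Int)) (limit : List (String × List Int)) (i : Nat)
    (hi : i < am.length)
    (hcf : pvChkA limit "left" (i : Int) (height_visibility (am.getD i [])) = false) :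
    pvStepA am limit (am.length : Int) (i : Int) = false := by
  simp only [pvStepA, rowget_some am i hi, hcf, Bool.false_and]

theorem step_false_right (am : List (List Int)) (limit : List (String × List Int)) (i : Nat)
    (hi : i < am.length)
    (hcf : pvChkA limit "right" (i : Int) (height_visibility (am.getD i []).reverse) = false) :
    pvStepA am limit (am.length : Int) (i : Int) = false := by
  simp only [pvStepA, rowget_some am i hi, hcf, Bool.false_and, Bool.and_false]

theorem step_false_top (am : List (List Int)) (limit : List (String × List Int)) (i : Nat)
    (hi : i < am.length) (hcol : ∀ row ∈ am, i < row.length)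
    (hcf : pvChkA limit "top" (i : Int)
      (height_visibility (am.map (fun r => r.getD i 0))) = false) :
    pvStepA am limit (am.length : Int) (i : Int) = false := by
  simp only [pvStepA, rowget_some am i hi, colA_range am i hcol, hcf,
    Bool.false_and, Bool.and_false]

theorem step_false_bottom (am : List (List Int)) (limit : List (String × List Int)) (i : Nat)
    (hi : i < am.length) (hcol : ∀ row ∈ am, i < row.length)
    (hcf : pvChkA limit "bottom" (i : Int)
      (height_visibility (am.map (fun r => r.getD i 0)).reverse) = false) :
    pvStepA am limit (am.length : Int) (i : Int) = false := by
  simp only [pvStepA, rowget_some am i hi, colA_range am i hcol, hcf,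
    Bool.false_and, Bool.and_false]

theorem bport_false (am : List (List Int)) (limit : List (String × List Int)) (i : Nat)
    (s : String) (hi : i < am.length) (hs : s ∈ pvSides)
    (hcf : pvChkB limit am (pvZipStar am) s (i : Int) = false) :
    check_limitation_alt am limit = false := by
  rw [check_limitation_alt]
  exact all_false _ _ ((i : Nat) : Int)
    (PySem.List.mem_pyRange_one.mpr ⟨by omega, by omega⟩)
    (all_false _ _ s hs hcf)

-- ===== VERDICT (by name: the statement is the Claim_ definition above) =====
set_option maxHeartbeats 2000000 in
theorem check_limitation_spec : Claim_equal_check_limitation := by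
  intro am limit _dom hpre
  unfold Spec_check_limitation
  rcases hpre with ⟨hrows, hok⟩ | hEF
  · -- every access exists: both ports are the same conjunction of checks, index by index
    rw [check_limitation, check_limitation_alt, PySem.List.pyRange_zero_natCast,
      List.all_map, List.all_map]
    apply all_ext
    intro k hk
    have hkN := List.mem_range.mp hk
    have hcol : ∀ row ∈ am, k < row.length :=
      fun row hrow => lt_of_lt_of_le hkN (hrows row hrow)
    simp only [Function.comp_apply]
    rw [stepA_eq am limit k hkN hcol]
    have eL := chkB_eq_chkA limit am (pvZipStar am) "left" (k : Int) _
      (visB_left am (pvZipStar am) k hkN)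
    have eR := chkB_eq_chkA limit am (pvZipStar am) "right" (k : Int) _
      (visB_right am (pvZipStar am) k hkN)
    have eT := chkB_eq_chkA limit am (pvZipStar am) "top" (k : Int) _
      (visB_top am k hkN hcol)
    have eB := chkB_eq_chkA limit am (pvZipStar am) "bottom" (k : Int) _
      (visB_bottom am k hkN hcol)
    simp only [pvSides, List.all_cons, List.all_nil, Bool.and_true, eL, eR, eT, eB]
  · -- some check fails before A's scan could raise: both ports evaluate it to false
    obtain ⟨i, hi, s, hs, hfail, -, -⟩ := hEF
    have hiN : i < am.length := List.mem_range.mp hi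
    simp only [pvFail, Bool.and_eq_true, Bool.or_eq_true, decide_eq_true_eq] at hfail
    obtain ⟨⟨⟨hok, hcolok⟩, h0⟩, hne⟩ := hfail
    have chkBf : ∀ v, pvVisB am (pvZipStar am) s (i : Int) = some v →
        ((pvLookup limit s).getD []).getD i 0 ≠ v →
        pvChkB limit am (pvZipStar am) s (i : Int) = false := by
      intro v hvis hnev
      rw [chkB_eq_chkA limit am (pvZipStar am) s (i : Int) v hvis]
      exact chk_false limit s i v hok h0 hnev
    simp only [pvSides, List.mem_cons, List.not_mem_nil, or_false] at hs
    have hsmem : ∀ s', s' = "left" ∨ s' = "right" ∨ s' = "top" ∨ s' = "bottom" →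
        s' ∈ pvSides := by
      intro s' h
      simp only [pvSides, List.mem_cons, List.not_mem_nil, or_false]
      exact h
    rcases hs with rfl | rfl | rfl | rfl
    · rw [sideVal_left, pvVis3_eq_hv] at hne
      rw [aport_false am limit i hiN (step_false_left am limit i hiN
            (chk_false limit "left" i _ hok h0 hne)),
        bport_false am limit i "left" hiN (hsmem _ (Or.inl rfl))
            (chkBf _ (visB_left am (pvZipStar am) i hiN) hne)]
    · rw [sideVal_right, pvVis3_eq_hv] at hne
      rw [aport_false am limit i hiN (step_false_right am limit i hiN
            (chk_false limit "right" i _ hok h0 hne)),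
        bport_false am limit i "right" hiN (hsmem _ (Or.inr (Or.inl rfl)))
            (chkBf _ (visB_right am (pvZipStar am) i hiN) hne)]
    · rw [sideVal_top, pvVis3_eq_hv] at hne
      have hcolok' : pvColOk am i = true := by
        rcases hcolok with h | h
        · exact absurd h (by simp [pvSideIdx])
        · exact h
      have hcolall : ∀ row ∈ am, i < row.length := by
        simpa [pvColOk, List.all_eq_true] using hcolok'
      rw [aport_false am limit i hiN (step_false_top am limit i hiN hcolall
            (chk_false limit "top" i _ hok h0 hne)),
        bport_false am limit i "top" hiN (hsmem _ (Or.inr (Or.inr (Or.inl rfl))))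
            (chkBf _ (visB_top am i hiN hcolall) hne)]
    · rw [sideVal_bottom, pvVis3_eq_hv] at hne
      have hcolok' : pvColOk am i = true := by
        rcases hcolok with h | h
        · exact absurd h (by simp [pvSideIdx])
        · exact h
      have hcolall : ∀ row ∈ am, i < row.length := by
        simpa [pvColOk, List.all_eq_true] using hcolok'
      rw [aport_false am limit i hiN (step_false_bottom am limit i hiN hcolall
            (chk_false limit "bottom" i _ hok h0 hne)),
        bport_false am limit i "bottom" hiN (hsmem _ (Or.inr (Or.inr (Or.inr rfl))))
            (chkBf _ (visB_bottom am i hiN hcolall) hne)]
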